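-- pv_equiv track=rewrite | github.com/ledpear/algorithm | PROGRAMMERS/Level 2/[1차] 프렌즈4블록_python/CodingTest.py | solution
-- ===== SOURCE A (Python) =====
-- def blockCheck(x, y, board):
--     if board[x][y] != ' ' and board[x][y] == board[x][y+1] and board[x][y] == board[x+1][y] and board[x][y] == board[x+1][y+1]:
--         return True
--     else:
--         return False
--
-- def blockCrush(x, y, board, answer):
--     pos_arr = [[x,y],[x+1,y],[x,y+1],[x+1,y+1]]
--
--     for pos in pos_arr:
--         pos_x = pos[0]
--         pos_y = pos[1]
--
--         if board[pos_x][pos_y] != ' ':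
--             answer += 1
--             board[pos_x][pos_y] = ' '
--
--     return answer
--
-- def boardSetting(m, n, board) :
--     new_board = [[' '] * n for i in range(m)]
--
--     for y in range(n):
--         new_x = m - 1
--
--         for i in range(m):
--
--             x = m - i - 1
--             if board[x][y] != ' ' :
--                 new_board[new_x][y] = board[x][y]
--                 new_x -= 1
--
--     return new_board
--
-- def solution(m, n, board):
--     for i in range(m):
--         board[i] = list(board[i])
--
--
--     answer = 0
--     crush_pos = []
--     while True:
--         crush_pos.clear()
--         for x in range(m - 1):
--             for y in range(n - 1):
--                 if blockCheck(x, y, board):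
--                     crush_pos.append([x, y])
--
--         if not crush_pos:
--             break
--
--         for crush in crush_pos:
--             answer = blockCrush(crush[0], crush[1], board, answer)
--
--         board = boardSetting(m, n, board)
--
--
--     return answer
-- ===== SOURCE B (Python) =====
-- def solution(m, n, board):
--     # Bottom-anchored solid-stack representation: each column is a stack of
--     # blocks with no blanks, so gravity never has to be applied; matching
--     # compares adjacent stacks by height and removal is an index filter.
--     # Return value only: does not mutate `board` (A does, in place).
--     if m < 2 or n < 2:
--         return 0
--     cols = [[board[x][y] for x in range(m - 1, -1, -1)] for y in range(n)]
--     total = 0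
--     while True:
--         marks = set()
--         for y in range(n - 1):
--             a, b = cols[y], cols[y + 1]
--             for k in range(min(len(a), len(b)) - 1):
--                 if a[k] == a[k + 1] and a[k] == b[k] and a[k] == b[k + 1]:
--                     marks.update(((y, k), (y, k + 1), (y + 1, k), (y + 1, k + 1)))
--         if not marks:
--             return total
--         total += len(marks)
--         cols = [[c for k, c in enumerate(col) if (y, k) not in marks]
--                 for y, col in enumerate(cols)]
-- ===== Notes on version B (the rewrite author's own statement) =====
-- stated objective: alternative
-- what changed: B replaces A's m-by-n grid with blanks, per-round in-place blanking and an explicit gravity rebuild (boardSetting) by bottom-anchored stacks of solid blocks per column: blanks never exist, matching compares adjacent stacks at equal heights, removal is an index filter per stack, and the gravity pass disappears; return values agree (B does not mutate the input list, A does).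
-- outside the precondition, e.g. on solution(2, 2, [' ', 'ab']): A returns 0, B raises IndexError; on solution(2, 2, ['  ', '  ']): A returns 0, B returns 4
import Mathlib
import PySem

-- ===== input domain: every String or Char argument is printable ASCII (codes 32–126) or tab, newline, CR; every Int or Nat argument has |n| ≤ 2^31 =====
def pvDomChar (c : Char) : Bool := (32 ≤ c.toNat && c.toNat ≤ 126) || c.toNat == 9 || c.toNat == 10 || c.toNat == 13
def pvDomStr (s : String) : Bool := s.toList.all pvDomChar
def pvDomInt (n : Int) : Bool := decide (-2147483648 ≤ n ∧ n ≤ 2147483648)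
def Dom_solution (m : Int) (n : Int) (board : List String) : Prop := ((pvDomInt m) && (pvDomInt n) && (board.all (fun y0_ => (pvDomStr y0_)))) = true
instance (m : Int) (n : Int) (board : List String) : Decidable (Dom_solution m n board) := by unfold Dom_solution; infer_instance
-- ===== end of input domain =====

-- B replaces A's m×n grid with blanks, per-cell in-place blanking and an explicit
-- per-round gravity rebuild (boardSetting) by bottom-anchored stacks of solid blocks
-- per column: blanks never exist, matches are found by comparing adjacent stacks at
-- equal heights, removal is an index filter on each stack, and the gravity pass
-- disappears. Return value only: A mutates `board` in place, B does not.

-- ===== PORT A =====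
-- A mutates `board` in place (rows become char lists, matches blanked); the port models the
-- return value, working on the first m rows (the only ones A ever reads).
def pvGetA (g : List (List Char)) (x y : Nat) : Char := (g.getD x []).getD y ' '

def pvSetA (g : List (List Char)) (x y : Nat) (c : Char) : List (List Char) :=
  g.set x ((g.getD x []).set y c)

def blockCheckA (g : List (List Char)) (x y : Nat) : Bool :=
  decide (pvGetA g x y ≠ ' ') && (pvGetA g x y == pvGetA g x (y+1)) &&
    (pvGetA g x y == pvGetA g (x+1) y) && (pvGetA g x y == pvGetA g (x+1) (y+1))

def blockCrushA (x y : Nat) (s : List (List Char) × Int) : List (List Char) × Int :=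
  [(x, y), (x+1, y), (x, y+1), (x+1, y+1)].foldl
    (fun (s : List (List Char) × Int) p =>
      if pvGetA s.1 p.1 p.2 ≠ ' ' then (pvSetA s.1 p.1 p.2 ' ', s.2 + 1) else s) s

def boardSettingA (M N : Nat) (g : List (List Char)) : List (List Char) :=
  (List.range N).foldl
    (fun nb y =>
      ((List.range M).foldl
        (fun (s : List (List Char) × Nat) i =>
          let x := M - 1 - i
          if pvGetA g x y ≠ ' ' then (pvSetA s.1 s.2 y (pvGetA g x y), s.2 - 1) else s)
        (nb, M - 1)).1)
    (List.replicate M (List.replicate N ' '))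

def crushPosA (M N : Nat) (g : List (List Char)) : List (Nat × Nat) :=
  (List.range (M - 1)).flatMap
    (fun x => ((List.range (N - 1)).filter (fun y => blockCheckA g x y)).map (fun y => (x, y)))

-- `while True`: fueled; each non-trivial round blanks ≥ 4 cells, so M*N+1 rounds never run out.
def loopA (M N : Nat) : Nat → List (List Char) → Int → Int
  | 0, _, ans => ans
  | fuel + 1, g, ans =>
    let cp := crushPosA M N g
    if cp = [] then ans
    else
      let s := cp.foldl (fun s p => blockCrushA p.1 p.2 s) (g, ans)
      loopA M N fuel (boardSettingA M N s.1) s.2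

def solution (m : Int) (n : Int) (board : List String) : Int :=
  loopA m.toNat n.toNat (m.toNat * n.toNat + 1) ((board.take m.toNat).map String.toList) 0

-- ===== PORT B =====
-- cols[y] is column y bottom-up: `[board[x][y] for x in range(m-1,-1,-1)]`
def colsInitB (M N : Nat) (board : List String) : List (List Char) :=
  (List.range N).map (fun y =>
    (List.range M).map (fun i => (board.getD (M - 1 - i) "").toList.getD y ' '))

def sGetB (cols : List (List Char)) (y k : Nat) : Char := (cols.getD y []).getD k ' '

-- `a[k] == a[k+1] and a[k] == b[k] and a[k] == b[k+1]` for a = cols[y], b = cols[y+1]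
def guardB (cols : List (List Char)) (y k : Nat) : Bool :=
  (sGetB cols y k == sGetB cols y (k+1)) && (sGetB cols y k == sGetB cols (y+1) k)
    && (sGetB cols y k == sGetB cols (y+1) (k+1))

def marksB (N : Nat) (cols : List (List Char)) : PySem.Set (Nat × Nat) :=
  (List.range (N - 1)).foldl
    (fun h y =>
      (List.range (min (cols.getD y []).length (cols.getD (y+1) []).length - 1)).foldl
        (fun h k =>
          if guardB cols y k then
            PySem.Set.update h [(y, k), (y, k+1), (y+1, k), (y+1, k+1)]
          else h)
        h)
    PySem.Set.empty

-- `[[c for k, c in enumerate(col) if (y, k) not in marks] for y, col in enumerate(cols)]`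
def removeMarksB (marks : PySem.Set (Nat × Nat)) (cols : List (List Char)) : List (List Char) :=
  cols.zipIdx.map (fun p =>
    p.1.zipIdx.filterMap (fun q =>
      if PySem.Set.contains marks (p.2, q.2) then none else some q.1))

-- `while True`: fueled like A's loop; a non-trivial round removes ≥ 4 of ≤ M*N blocks.
def loopB (N : Nat) : Nat → List (List Char) → Int → Int
  | 0, _, total => total
  | fuel + 1, cols, total =>
    let mk := marksB N cols
    if mk = [] then total
    else loopB N fuel (removeMarksB mk cols) (total + mk.length)

def solution_alt (m : Int) (n : Int) (board : List String) : Int :=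
  if m < 2 ∨ n < 2 then 0
  else loopB n.toNat (m.toNat * n.toNat + 1) (colsInitB m.toNat n.toNat board) 0

-- ===== PRECONDITION & SPEC =====
-- Pre_ excludes (i) inputs where Python A raises IndexError: m exceeding the number of
-- rows, or a row among the first m shorter than n when a 2x2 window exists (on a few such
-- boards A still returns 0 via `and` short-circuiting while B, which reads the whole m×n
-- window, raises); and (ii) boards whose active m×n area contains the blank character ' ',
-- a state unreachable in the game, on which A's raw-layout first round is accidental and
-- B's solid-stack representation (which never holds blanks) defensibly disagrees.
def Pre_solution (m : Int) (n : Int) (board : List String) : Prop :=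
  m ≤ (board.length : Int) ∧
    (2 ≤ m → 2 ≤ n → ∀ s ∈ board.take m.toNat,
      n ≤ (s.toList.length : Int) ∧ ' ' ∉ s.toList.take n.toNat)

instance (m : Int) (n : Int) (board : List String) : Decidable (Pre_solution m n board) := by
  unfold Pre_solution; infer_instance

def pvWitness_solution : Int × Int × List String := (2, 2, ["AA", "AA"])

def Spec_solution (m : Int) (n : Int) (board : List String) (out : Int) : Prop := out = solution_alt m n board
instance (m : Int) (n : Int) (board : List String) (out : Int) : Decidable (Spec_solution m n board out) := by unfold Spec_solution; infer_instance

-- ===== CLAIM (what is proved, stated in full; the proofs are below) =====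
def Claim_equal_solution : Prop := ∀ (m : Int) (n : Int) (board : List String), Dom_solution m n board → Pre_solution m n board → Spec_solution m n board (solution m n board)

-- ===== LEMMAS AND PROOFS =====

-- proof-only helpers
def cellsOf (p : Nat × Nat) : List (Nat × Nat) := [(p.1, p.2), (p.1+1, p.2), (p.1, p.2+1), (p.1+1, p.2+1)]

def cellList (M N : Nat) (g : List (List Char)) : List (Nat × Nat) :=
  (crushPosA M N g).flatMap cellsOf

def markList (N : Nat) (cols : List (List Char)) : List (Nat × Nat) :=
  (List.range (N - 1)).flatMap
    (fun y => ((List.range (min (cols.getD y []).length (cols.getD (y+1) []).length - 1)).filter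
        (fun k => guardB cols y k)).flatMap
      (fun k => [(y, k), (y, k+1), (y+1, k), (y+1, k+1)]))

def blankL (b : List (Nat × Nat)) (g : List (List Char)) : List (List Char) :=
  b.foldl (fun g c => pvSetA g c.1 c.2 ' ') g

def Shape (M N : Nat) (g : List (List Char)) : Prop :=
  g.length = M ∧ ∀ x < M, N ≤ (g.getD x []).length

def Wcol (M : Nat) (g : List (List Char)) (y : Nat) : List Char :=
  (List.range M).map (fun x => pvGetA g x y)

-- the simulation invariant: column y of A's grid is blanks on top of the reverse of B's stack
def SInv (M N : Nat) (g cols : List (List Char)) : Prop :=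
  Shape M N g ∧ cols.length = N ∧
    ∀ y < N, (cols.getD y []).length ≤ M ∧ (∀ c ∈ cols.getD y [], c ≠ ' ') ∧
      Wcol M g y = List.replicate (M - (cols.getD y []).length) ' ' ++ (cols.getD y []).reverse

theorem pvGetA_pvSetA (g : List (List Char)) (x y : Nat) (c : Char) (x' y' : Nat)
    (hx : x < g.length) (hy : y < (g.getD x []).length) :
    pvGetA (pvSetA g x y c) x' y' = if x' = x ∧ y' = y then c else pvGetA g x' y' := by
  simp only [pvGetA, pvSetA, List.getD_eq_getElem?_getD, List.getElem?_set]
  by_cases hx' : x = x'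
  · subst hx'
    simp only [if_pos trivial, if_pos hx, Option.getD_some, true_and, List.getElem?_set]
    by_cases hy' : y = y'
    · subst hy'
      have h2 : y < (g[x]?.getD []).length := by
        simpa [List.getD_eq_getElem?_getD] using hy
      simp [h2]
    · rw [if_neg hy', if_neg (fun h : y' = y => hy' h.symm)]
  · have h1 : ¬ (x' = x ∧ y' = y) := fun h => hx' h.1.symm
    simp [Ne.symm hx'] at *
    simp [hx']

theorem shape_pvSetA (M N : Nat) (g : List (List Char)) (x y : Nat) (c : Char)
    (hg : Shape M N g) : Shape M N (pvSetA g x y c) := by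
  obtain ⟨hlen, hrow⟩ := hg
  refine ⟨by simpa [pvSetA] using hlen, fun x' hx' => ?_⟩
  simp only [pvSetA, List.getD_eq_getElem?_getD, List.getElem?_set]
  by_cases hx : x = x'
  · subst hx
    by_cases hin : x < g.length
    · have := hrow x hx'
      rw [List.getD_eq_getElem?_getD, List.getElem?_eq_getElem hin] at this
      simpa [hin] using this
    · simpa [hin] using hrow x hx'
  · simpa [hx] using hrow x' hx'

theorem shape_blankL (M N : Nat) (b : List (Nat × Nat)) (g : List (List Char))
    (hg : Shape M N g) : Shape M N (blankL b g) := by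
  induction b generalizing g with
  | nil => exact hg
  | cons c cs ih => exact ih _ (shape_pvSetA M N g c.1 c.2 ' ' hg)

theorem pvGetA_blankL (M N : Nat) (b : List (Nat × Nat)) (g : List (List Char))
    (hg : Shape M N g) (hb : ∀ c ∈ b, c.1 < M ∧ c.2 < N) (x y : Nat) :
    pvGetA (blankL b g) x y = if (x, y) ∈ b then ' ' else pvGetA g x y := by
  induction b generalizing g with
  | nil => simp [blankL]
  | cons c cs ih =>
    obtain ⟨hc1, hc2⟩ := hb c (List.mem_cons_self ..)
    have hxlen : c.1 < g.length := hg.1 ▸ hc1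
    have hylen : c.2 < (g.getD c.1 []).length := lt_of_lt_of_le hc2 (hg.2 c.1 hc1)
    have step : blankL (c :: cs) g = blankL cs (pvSetA g c.1 c.2 ' ') := rfl
    rw [step, ih (pvSetA g c.1 c.2 ' ') (shape_pvSetA M N g c.1 c.2 ' ' hg)
      (fun d hd => hb d (List.mem_cons_of_mem _ hd)),
      pvGetA_pvSetA g c.1 c.2 ' ' x y hxlen hylen]
    by_cases hmem : (x, y) ∈ cs
    · simp [hmem]
    · by_cases heq : (x, y) = c
      · have h3 : x = c.1 ∧ y = c.2 := by rw [← heq]; exact ⟨rfl, rfl⟩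
        simp [hmem, heq, h3]
      · have h3 : ¬ (x = c.1 ∧ y = c.2) := by
          intro h; exact heq (by cases c; simp_all)
        simp [hmem, heq, h3]

theorem set_update_append' {β : Type} [BEq β] (s : PySem.Set β) (l1 l2 : List β) :
    PySem.Set.update (PySem.Set.update s l1) l2 = PySem.Set.update s (l1 ++ l2) :=
  (List.foldl_append).symm

theorem foldl_update_if {α β : Type} [BEq β] (L : List α) (f : α → Bool) (cell : α → List β)
    (s : PySem.Set β) :
    L.foldl (fun h p => if f p then PySem.Set.update h (cell p) else h) s
      = PySem.Set.update s ((L.filter f).flatMap cell) := by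
  induction L generalizing s with
  | nil => rfl
  | cons a L ih =>
    by_cases hf : f a
    · simp only [List.foldl_cons, hf, if_pos, List.filter_cons_of_pos hf, List.flatMap_cons]
      rw [ih, set_update_append']
    · simp only [List.foldl_cons, hf, if_neg, List.filter_cons_of_neg, Bool.false_eq_true,
        not_false_iff, ih]

theorem foldl_update_all {α β : Type} [BEq β] (L : List α) (g : α → List β) (s : PySem.Set β) :
    L.foldl (fun h x => PySem.Set.update h (g x)) s = PySem.Set.update s (L.flatMap g) := by
  induction L generalizing s with
  | nil => rfl
  | cons a L ih =>
    simp only [List.foldl_cons, List.flatMap_cons]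
    rw [ih, set_update_append']

theorem marksB_eq (N : Nat) (cols : List (List Char)) :
    marksB N cols = PySem.Set.ofList (markList N cols) := by
  unfold marksB
  have hfun : (fun (h : PySem.Set (Nat × Nat)) y =>
      (List.range (min (cols.getD y []).length (cols.getD (y+1) []).length - 1)).foldl
        (fun h k =>
          if guardB cols y k then
            PySem.Set.update h [(y, k), (y, k+1), (y+1, k), (y+1, k+1)]
          else h)
        h)
      = fun h y => PySem.Set.update h
          (((List.range (min (cols.getD y []).length (cols.getD (y+1) []).length - 1)).filter
              (fun k => guardB cols y k)).flatMap
            (fun k => [(y, k), (y, k+1), (y+1, k), (y+1, k+1)])) := by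
    funext h y
    exact foldl_update_if _ _ _ h
  rw [hfun, foldl_update_all, PySem.Set.ofList_eq_foldl]
  rfl

theorem getD_replicate_space (n x : Nat) : (List.replicate n ' ').getD x ' ' = ' ' := by
  simp only [List.getD_eq_getElem?_getD, List.getElem?_replicate]
  split <;> rfl

theorem wcol_drop_cons (M : Nat) (g : List (List Char)) (y j : Nat) (hj : j < M) :
    (Wcol M g y).drop (M - (j+1)) = pvGetA g (M - 1 - j) y :: (Wcol M g y).drop (M - j) := by
  have hlen : (Wcol M g y).length = M := by simp [Wcol]
  have h1 : M - (j+1) < (Wcol M g y).length := by omega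
  rw [List.drop_eq_getElem_cons h1]
  have h2 : M - (j+1) + 1 = M - j := by omega
  have h3 : (Wcol M g y)[M - (j+1)] = pvGetA g (M - 1 - j) y := by
    have : M - (j+1) = M - 1 - j := by omega
    simp [Wcol, this]
  rw [h2, h3]

theorem inner_spec (M N : Nat) (g : List (List Char)) (y : Nat) (hy : y < N)
    (nb : List (List Char)) (hnb : Shape M N nb)
    (hcol0 : ∀ x < M, pvGetA nb x y = ' ') (j : Nat) (hj : j ≤ M) :
    Shape M N ((List.range j).foldl
        (fun (s : List (List Char) × Nat) i =>
          let x := M - 1 - i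
          if pvGetA g x y ≠ ' ' then (pvSetA s.1 s.2 y (pvGetA g x y), s.2 - 1) else s)
        (nb, M - 1)).1 ∧
      (∀ x y', y' ≠ y → pvGetA ((List.range j).foldl
        (fun (s : List (List Char) × Nat) i =>
          let x := M - 1 - i
          if pvGetA g x y ≠ ' ' then (pvSetA s.1 s.2 y (pvGetA g x y), s.2 - 1) else s)
        (nb, M - 1)).1 x y' = pvGetA nb x y') ∧
      ((List.range j).foldl
        (fun (s : List (List Char) × Nat) i =>
          let x := M - 1 - i
          if pvGetA g x y ≠ ' ' then (pvSetA s.1 s.2 y (pvGetA g x y), s.2 - 1) else s)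
        (nb, M - 1)).2 = M - 1 - (((Wcol M g y).drop (M - j)).filter (fun c => c ≠ ' ')).length ∧
      (((Wcol M g y).drop (M - j)).filter (fun c => c ≠ ' ')).length ≤ j ∧
      (∀ x < M, pvGetA ((List.range j).foldl
        (fun (s : List (List Char) × Nat) i =>
          let x := M - 1 - i
          if pvGetA g x y ≠ ' ' then (pvSetA s.1 s.2 y (pvGetA g x y), s.2 - 1) else s)
        (nb, M - 1)).1 x y
        = (List.replicate (M - (((Wcol M g y).drop (M - j)).filter (fun c => c ≠ ' ')).length) ' '
            ++ ((Wcol M g y).drop (M - j)).filter (fun c => c ≠ ' ')).getD x ' ') := by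
  induction j with
  | zero =>
    have hdrop : (Wcol M g y).drop M = [] := List.drop_eq_nil_of_le (by simp [Wcol])
    simp only [List.range_zero, List.foldl_nil, Nat.sub_zero, hdrop, List.filter_nil,
      List.length_nil, List.append_nil]
    refine ⟨hnb, fun _ _ _ => trivial, trivial, Nat.le_refl 0, fun x hx => ?_⟩
    rw [hcol0 x hx, getD_replicate_space]
  | succ j ih =>
    have hjM : j < M := by omega
    obtain ⟨ihS, ihU, ihC, ihK, ihCol⟩ := ih (by omega)
    simp only [List.range_succ, List.foldl_append, List.foldl_cons, List.foldl_nil,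
      ne_eq, decide_not] at *
    rw [wcol_drop_cons M g y j hjM]
    by_cases hc : pvGetA g (M - 1 - j) y = ' '
    · rw [List.filter_cons_of_neg (by simpa using hc), if_neg (not_not_intro hc)]
      exact ⟨ihS, ihU, ihC, by omega, ihCol⟩
    · rw [List.filter_cons_of_pos (by simpa using hc), if_pos hc]
      have hM1 : 1 ≤ M := by omega
      set r := (List.range j).foldl
        (fun (s : List (List Char) × Nat) i =>
          let x := M - 1 - i
          if pvGetA g x y ≠ ' ' then (pvSetA s.1 s.2 y (pvGetA g x y), s.2 - 1) else s)
        (nb, M - 1) with hrdef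
      set k := (((Wcol M g y).drop (M - j)).filter (fun c => !decide (c = ' '))).length with hkdef
      simp only [List.length_cons]
      have hkM : k < M := by omega
      have hrlen : (M - 1 - k) < r.1.length := by rw [ihS.1]; omega
      have hrow : y < (r.1.getD (M - 1 - k) []).length :=
        lt_of_lt_of_le hy (ihS.2 (M - 1 - k) (by omega))
      rw [ihC]
      refine ⟨shape_pvSetA M N r.1 (M - 1 - k) y _ ihS, ?_, by omega, by omega, ?_⟩
      · intro x y' hy'
        rw [pvGetA_pvSetA r.1 (M - 1 - k) y _ x y' hrlen hrow,
          if_neg (fun hh => hy' hh.2), ihU x y' hy']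
      · intro x hx
        rw [pvGetA_pvSetA r.1 (M - 1 - k) y _ x y hrlen hrow]
        simp only [List.length_cons]
        by_cases hxk : x = M - 1 - k
        · rw [if_pos ⟨hxk, by trivial⟩,
            List.getD_append_right _ _ _ _ (by simp [List.length_replicate]; omega)]
          simp only [List.length_replicate]
          have h0 : x - (M - (k + 1)) = 0 := by omega
          rw [h0]; rfl
        · rw [if_neg (fun hh => hxk hh.1), ihCol x hx]
          by_cases hlt : x < M - (k + 1)
          · rw [List.getD_append _ _ _ _ (by simp [List.length_replicate]; omega),
              List.getD_append _ _ _ _ (by simp [List.length_replicate]; omega),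
              getD_replicate_space, getD_replicate_space]
          · have hge : M - k ≤ x := by omega
            rw [List.getD_append_right _ _ _ _ (by simp [List.length_replicate]; omega),
              List.getD_append_right _ _ _ _ (by simp [List.length_replicate]; omega)]
            have h1 : x - (List.replicate (M - (k + 1)) ' ').length = (x - (List.replicate (M - k) ' ').length) + 1 := by
              simp only [List.length_replicate]; omega
            rw [h1, List.getD_cons_succ]

def padColD (M : Nat) (g : List (List Char)) (y : Nat) : List Char :=
  List.replicate (M - ((Wcol M g y).filter (fun c => c ≠ ' ')).length) ' '
    ++ (Wcol M g y).filter (fun c => c ≠ ' ')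

theorem base_get (M N x y : Nat) :
    pvGetA (List.replicate M (List.replicate N ' ')) x y = ' ' := by
  simp only [pvGetA, List.getD_eq_getElem?_getD, List.getElem?_replicate]
  split
  · exact getD_replicate_space N y ▸ by simp [List.getD_eq_getElem?_getD]
  · rfl

theorem base_shape (M N : Nat) : Shape M N (List.replicate M (List.replicate N ' ')) := by
  refine ⟨by simp, fun x hx => ?_⟩
  simp [List.getD_eq_getElem?_getD, List.getElem?_replicate, hx]

theorem outer_spec (M N : Nat) (g : List (List Char)) (j : Nat) (hj : j ≤ N) :
    Shape M N ((List.range j).foldl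
      (fun nb y =>
        ((List.range M).foldl
          (fun (s : List (List Char) × Nat) i =>
            let x := M - 1 - i
            if pvGetA g x y ≠ ' ' then (pvSetA s.1 s.2 y (pvGetA g x y), s.2 - 1) else s)
          (nb, M - 1)).1)
      (List.replicate M (List.replicate N ' '))) ∧
    (∀ x < M, ∀ y < N, pvGetA ((List.range j).foldl
      (fun nb y =>
        ((List.range M).foldl
          (fun (s : List (List Char) × Nat) i =>
            let x := M - 1 - i
            if pvGetA g x y ≠ ' ' then (pvSetA s.1 s.2 y (pvGetA g x y), s.2 - 1) else s)
          (nb, M - 1)).1)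
      (List.replicate M (List.replicate N ' '))) x y
      = if y < j then (padColD M g y).getD x ' ' else ' ') := by
  induction j with
  | zero =>
    simp only [List.range_zero, List.foldl_nil]
    exact ⟨base_shape M N, fun x _ y _ => by simp [base_get]⟩
  | succ j ih =>
    obtain ⟨ihS, ihG⟩ := ih (by omega)
    simp only [List.range_succ, List.foldl_append, List.foldl_cons, List.foldl_nil]
    have hjN : j < N := by omega
    have hcol0 : ∀ x < M, pvGetA ((List.range j).foldl
        (fun nb y =>
          ((List.range M).foldl
            (fun (s : List (List Char) × Nat) i =>
              let x := M - 1 - i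
              if pvGetA g x y ≠ ' ' then (pvSetA s.1 s.2 y (pvGetA g x y), s.2 - 1) else s)
            (nb, M - 1)).1)
        (List.replicate M (List.replicate N ' '))) x j = ' ' := by
      intro x hx
      rw [ihG x hx j hjN, if_neg (by omega)]
    obtain ⟨S', U', _, _, Col'⟩ := inner_spec M N g j hjN _ ihS hcol0 M (Nat.le_refl M)
    refine ⟨S', fun x hx y hy => ?_⟩
    by_cases hyj : y = j
    · subst hyj
      rw [Col' x hx, if_pos (by omega)]
      simp [padColD, Nat.sub_self, List.drop_zero]
    · rw [U' x y hyj, ihG x hx y hy]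
      by_cases hlt : y < j
      · rw [if_pos hlt, if_pos (by omega)]
      · rw [if_neg hlt, if_neg (by omega)]

theorem boardSetting_spec (M N : Nat) (g : List (List Char)) :
    Shape M N (boardSettingA M N g) ∧
      ∀ x < M, ∀ y < N, pvGetA (boardSettingA M N g) x y = (padColD M g y).getD x ' ' := by
  obtain ⟨hS, hG⟩ := outer_spec M N g N (Nat.le_refl N)
  refine ⟨hS, fun x hx y hy => ?_⟩
  have h1 := hG x hx y hy
  rw [if_pos hy] at h1
  exact h1

theorem blockCheckA_val (g : List (List Char)) (x y : Nat) (h : blockCheckA g x y = true) :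
    pvGetA g x y ≠ ' ' ∧ pvGetA g x (y+1) = pvGetA g x y ∧ pvGetA g (x+1) y = pvGetA g x y
      ∧ pvGetA g (x+1) (y+1) = pvGetA g x y := by
  simp only [blockCheckA, Bool.and_eq_true, decide_eq_true_eq, beq_iff_eq] at h
  exact ⟨h.1.1.1, h.1.1.2.symm, h.1.2.symm, h.2.symm⟩

theorem mem_cellList (M N : Nat) (g : List (List Char)) (q : Nat × Nat) :
    q ∈ cellList M N g ↔ ∃ x y, x < M - 1 ∧ y < N - 1 ∧ blockCheckA g x y = true
      ∧ q ∈ cellsOf (x, y) := by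
  simp only [cellList, crushPosA, List.mem_flatMap, List.mem_map, List.mem_filter,
    List.mem_range]
  constructor
  · rintro ⟨p, ⟨x, hx, y, ⟨hy, hb⟩, rfl⟩, hq⟩
    exact ⟨x, y, hx, hy, hb, hq⟩
  · rintro ⟨x, y, hx, hy, hb, hq⟩
    exact ⟨(x, y), ⟨x, hx, y, ⟨hy, hb⟩, rfl⟩, hq⟩

theorem cellList_spec (M N : Nat) (g : List (List Char)) :
    ∀ c ∈ cellList M N g, c.1 < M ∧ c.2 < N ∧ pvGetA g c.1 c.2 ≠ ' ' := by
  intro c hc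
  obtain ⟨x, y, hx, hy, hb, hcp⟩ := (mem_cellList M N g c).mp hc
  obtain ⟨hne, h2, h3, h4⟩ := blockCheckA_val g x y hb
  simp only [cellsOf, List.mem_cons, List.not_mem_nil, or_false] at hcp
  rcases hcp with h | h | h | h <;> subst h <;>
    simp only [] <;>
    refine ⟨by omega, by omega, ?_⟩
  · exact hne
  · rw [h3]; exact hne
  · rw [h2]; exact hne
  · rw [h4]; exact hne

theorem mem_markList (N : Nat) (cols : List (List Char)) (q : Nat × Nat) :
    q ∈ markList N cols ↔ ∃ y k, y < N - 1
      ∧ k < min (cols.getD y []).length (cols.getD (y+1) []).length - 1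
      ∧ guardB cols y k = true
      ∧ q ∈ [(y, k), (y, k+1), (y+1, k), (y+1, k+1)] := by
  simp only [markList, List.mem_flatMap, List.mem_filter, List.mem_range]
  constructor
  · rintro ⟨y, hy, k, ⟨hk, hg⟩, hq⟩
    exact ⟨y, k, hy, hk, hg, hq⟩
  · rintro ⟨y, k, hy, hk, hg, hq⟩
    exact ⟨y, hy, k, ⟨hk, hg⟩, hq⟩

theorem crushFold (M N : Nat) (g0 : List (List Char)) (hg : Shape M N g0)
    (cs : List (Nat × Nat))
    (hcs : ∀ c ∈ cs, c.1 < M ∧ c.2 < N ∧ pvGetA g0 c.1 c.2 ≠ ' ') :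
    ∀ (S : PySem.Set (Nat × Nat)) (a : Int), (∀ c ∈ S, c.1 < M ∧ c.2 < N) → S.Nodup →
    cs.foldl
      (fun (s : List (List Char) × Int) p =>
        if pvGetA s.1 p.1 p.2 ≠ ' ' then (pvSetA s.1 p.1 p.2 ' ', s.2 + 1) else s)
      (blankL S g0, a)
      = (blankL (PySem.Set.update S cs) g0,
          a + ((PySem.Set.update S cs).length : Int) - (S.length : Int)) := by
  induction cs with
  | nil =>
    intro S a _ _
    simp only [List.foldl_nil]
    have h1 : PySem.Set.update S [] = S := rfl
    rw [h1]
    refine Prod.ext rfl ?_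
    simp
  | cons c cs ih =>
    intro S a hS hnd
    have hcw := hcs c (List.mem_cons_self ..)
    have hcst : ∀ d ∈ cs, d.1 < M ∧ d.2 < N ∧ pvGetA g0 d.1 d.2 ≠ ' ' :=
      fun d hd => hcs d (List.mem_cons_of_mem _ hd)
    have hval : pvGetA (blankL S g0) c.1 c.2
        = if (c.1, c.2) ∈ S then ' ' else pvGetA g0 c.1 c.2 :=
      pvGetA_blankL M N S g0 hg hS c.1 c.2
    simp only [List.foldl_cons]
    by_cases hmem : c ∈ S
    · have hv : pvGetA (blankL S g0) c.1 c.2 = ' ' := by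
        rw [hval, if_pos (by exact hmem)]
      rw [if_neg (not_not_intro hv)]
      have hadd : PySem.Set.add S c = S := by
        simp [PySem.Set.add, hmem]
      have hupd : PySem.Set.update S (c :: cs) = PySem.Set.update S cs := by
        show List.foldl _ _ _ = _
        rw [List.foldl_cons]
        show PySem.Set.update (PySem.Set.add S c) cs = _
        rw [hadd]
      rw [hupd]
      exact ih hcst S a hS hnd
    · have hv : pvGetA (blankL S g0) c.1 c.2 ≠ ' ' := by
        rw [hval, if_neg (by exact hmem)]
        exact hcw.2.2
      rw [if_pos hv]
      have hadd : PySem.Set.add S c = S ++ [c] := by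
        simp [PySem.Set.add, hmem]
      have hblank : pvSetA (blankL S g0) c.1 c.2 ' ' = blankL (PySem.Set.add S c) g0 := by
        rw [hadd]
        show _ = List.foldl _ _ _
        rw [List.foldl_append]
        rfl
      rw [hblank]
      have hSadd : ∀ d ∈ PySem.Set.add S c, d.1 < M ∧ d.2 < N := by
        intro d hd
        rcases (PySem.Set.mem_add S c d).mp hd with h | h
        · exact hS d h
        · subst h; exact ⟨hcw.1, hcw.2.1⟩
      have := ih hcst (PySem.Set.add S c) (a + 1) hSadd (PySem.Set.nodup_add S c hnd)
      rw [this]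
      have hupd : PySem.Set.update S (c :: cs) = PySem.Set.update (PySem.Set.add S c) cs := rfl
      rw [hupd]
      refine Prod.ext rfl ?_
      have hlen : (PySem.Set.add S c).length = S.length + 1 := by
        rw [hadd, List.length_append, List.length_cons, List.length_nil]
      simp only [hlen]
      push_cast
      ring

theorem map_getD_self (l : List Char) (M : Nat) (h : l.length = M) :
    (List.range M).map (fun x => l.getD x ' ') = l := by
  apply List.ext_getElem
  · simp [h]
  · intro i h1 h2
    simp only [List.getElem_map, List.getElem_range]
    rw [List.getD_eq_getElem?_getD, List.getElem?_eq_getElem h2]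
    rfl

theorem padColD_length (M : Nat) (g : List (List Char)) (y : Nat) :
    (padColD M g y).length = M := by
  have hk : ((Wcol M g y).filter (fun c => c ≠ ' ')).length ≤ M := by
    calc ((Wcol M g y).filter (fun c => c ≠ ' ')).length ≤ (Wcol M g y).length :=
          List.length_filter_le _ _
      _ = M := by simp [Wcol]
  simp only [padColD, List.length_append, List.length_replicate]
  omega

theorem getD_reverse_eq (l : List Char) (i j : Nat) (hi : i < l.length) (hj : j < l.length)
    (hij : i + j = l.length - 1) : l.reverse.getD i ' ' = l.getD j ' ' := by
  rw [List.getD_eq_getElem?_getD, List.getD_eq_getElem?_getD,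
    List.getElem?_reverse (by simpa using hi), (by omega : l.length - 1 - i = j)]

theorem getD_mem {l : List Char} {k : Nat} (h : k < l.length) : l.getD k ' ' ∈ l := by
  rw [List.getD_eq_getElem?_getD, List.getElem?_eq_getElem h]
  exact List.getElem_mem h

-- reading A's grid through the invariant: cell (x,y) is stack entry M-1-x (blank above)
theorem getA_eq_sGet (M N : Nat) (g cols : List (List Char)) (h : SInv M N g cols)
    (x y : Nat) (hx : x < M) (hy : y < N) :
    pvGetA g x y = sGetB cols y (M - 1 - x) := by
  obtain ⟨_, _, hcol⟩ := h
  obtain ⟨hle, _, hW⟩ := hcol y hy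
  have hWx : pvGetA g x y = (Wcol M g y).getD x ' ' := by
    simp [Wcol, List.getD_eq_getElem?_getD, List.getElem?_map, List.getElem?_range, hx]
  rw [hWx, hW]
  by_cases hlt : x < M - (cols.getD y []).length
  · rw [List.getD_append _ _ _ _ (by simp only [List.length_replicate]; omega),
      getD_replicate_space]
    rw [sGetB, List.getD_eq_getElem?_getD, List.getElem?_eq_none (by omega)]
    rfl
  · rw [List.getD_append_right _ _ _ _ (by simp only [List.length_replicate]; omega)]
    rw [sGetB]
    simp only [List.length_replicate]
    exact getD_reverse_eq _ _ _ (by omega) (by omega) (by omega)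

theorem solid_iff (M N : Nat) (g cols : List (List Char)) (h : SInv M N g cols)
    (x y : Nat) (hx : x < M) (hy : y < N) :
    pvGetA g x y ≠ ' ' ↔ M - 1 - x < (cols.getD y []).length := by
  rw [getA_eq_sGet M N g cols h x y hx hy]
  obtain ⟨_, _, hcol⟩ := h
  obtain ⟨_, hns, _⟩ := hcol y hy
  constructor
  · intro hne
    by_contra hge
    rw [sGetB, List.getD_eq_getElem?_getD, List.getElem?_eq_none (by omega)] at hne
    exact hne rfl
  · intro hlt
    exact hns _ (getD_mem hlt)

-- the match correspondence: A's 2x2 check at (x,y) is B's guard at heights (M-2-x, M-1-x)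
theorem blockCheckA_iff (M N : Nat) (g cols : List (List Char)) (h : SInv M N g cols)
    (x y : Nat) (hx : x < M - 1) (hy : y < N - 1) :
    blockCheckA g x y = true
      ↔ M - 1 - x < (cols.getD y []).length ∧ M - 1 - x < (cols.getD (y+1) []).length
          ∧ guardB cols y (M - 2 - x) = true := by
  have hxM : x < M := by omega
  have hx1M : x + 1 < M := by omega
  have hyN : y < N := by omega
  have hy1N : y + 1 < N := by omega
  have e1 : pvGetA g x y = sGetB cols y (M - 1 - x) := getA_eq_sGet M N g cols h x y hxM hyN
  have e2 : pvGetA g x (y+1) = sGetB cols (y+1) (M - 1 - x) :=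
    getA_eq_sGet M N g cols h x (y+1) hxM hy1N
  have e3 : pvGetA g (x+1) y = sGetB cols y (M - 2 - x) := by
    have := getA_eq_sGet M N g cols h (x+1) y hx1M hyN
    rwa [(by omega : M - 1 - (x+1) = M - 2 - x)] at this
  have e4 : pvGetA g (x+1) (y+1) = sGetB cols (y+1) (M - 2 - x) := by
    have := getA_eq_sGet M N g cols h (x+1) (y+1) hx1M hy1N
    rwa [(by omega : M - 1 - (x+1) = M - 2 - x)] at this
  have hk1 : M - 1 - x = (M - 2 - x) + 1 := by omega
  constructor
  · intro hb
    obtain ⟨hne, q2, q3, q4⟩ := blockCheckA_val g x y hb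
    have hlen1 : M - 1 - x < (cols.getD y []).length :=
      (solid_iff M N g cols h x y hxM hyN).mp hne
    have hne2 : pvGetA g x (y+1) ≠ ' ' := by rw [q2]; exact hne
    have hlen2 : M - 1 - x < (cols.getD (y+1) []).length :=
      (solid_iff M N g cols h x (y+1) hxM hy1N).mp hne2
    refine ⟨hlen1, hlen2, ?_⟩
    simp only [guardB, Bool.and_eq_true, beq_iff_eq, ← hk1]
    refine ⟨⟨?_, ?_⟩, ?_⟩
    · rw [← e3, ← e1]; exact q3
    · rw [← e3, ← e4]; exact q3.trans q4.symm
    · rw [← e3, ← e2]; exact q3.trans q2.symm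
  · rintro ⟨hlen1, hlen2, hg⟩
    simp only [guardB, Bool.and_eq_true, beq_iff_eq, ← hk1, ← e1, ← e2, ← e3, ← e4] at hg
    obtain ⟨⟨g1, g2⟩, g3⟩ := hg
    have hne3 : pvGetA g (x+1) y ≠ ' ' := by
      have hs := solid_iff M N g cols h (x+1) y hx1M hyN
      rw [(by omega : M - 1 - (x+1) = M - 2 - x)] at hs
      exact hs.mpr (by omega)
    simp only [blockCheckA, Bool.and_eq_true, decide_eq_true_eq, beq_iff_eq]
    refine ⟨⟨⟨?_, ?_⟩, ?_⟩, ?_⟩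
    · rw [← g1]; exact hne3
    · rw [← g1]; exact g3
    · exact g1.symm
    · rw [← g1]; exact g2

-- marked stack entries are exactly the images (y, M-1-x) of marked grid cells
theorem markList_mem_iff (M N : Nat) (g cols : List (List Char)) (h : SInv M N g cols)
    (q : Nat × Nat) :
    q ∈ markList N cols ↔ ∃ p ∈ cellList M N g, q = (p.2, M - 1 - p.1) := by
  have hlenM : ∀ y < N, (cols.getD y []).length ≤ M := fun y hy => (h.2.2 y hy).1
  constructor
  · intro hq
    obtain ⟨y, k, hy, hk, hg, hmem⟩ := (mem_markList N cols q).mp hq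
    have hyN : y < N := by omega
    have hy1N : y + 1 < N := by omega
    have hkm : k + 1 < min (cols.getD y []).length (cols.getD (y+1) []).length := by omega
    have hk1 : k + 1 < (cols.getD y []).length := by omega
    have hk2 : k + 1 < (cols.getD (y+1) []).length := by omega
    have hkM : k + 1 < M := lt_of_lt_of_le hk1 (hlenM y hyN)
    set x := M - 2 - k with hxdef
    have hxlt : x < M - 1 := by omega
    have hkx : M - 2 - x = k := by omega
    have hk1x : M - 1 - x = k + 1 := by omega
    have hb : blockCheckA g x y = true := by
      rw [blockCheckA_iff M N g cols h x y hxlt hy]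
      exact ⟨by omega, by omega, by rw [hkx]; exact hg⟩
    simp only [List.mem_cons, List.not_mem_nil, or_false] at hmem
    rcases hmem with rfl | rfl | rfl | rfl
    · exact ⟨(x+1, y), (mem_cellList M N g _).mpr ⟨x, y, hxlt, hy, hb, by simp [cellsOf]⟩,
        by simp; omega⟩
    · exact ⟨(x, y), (mem_cellList M N g _).mpr ⟨x, y, hxlt, hy, hb, by simp [cellsOf]⟩,
        by simp; omega⟩
    · exact ⟨(x+1, y+1), (mem_cellList M N g _).mpr ⟨x, y, hxlt, hy, hb, by simp [cellsOf]⟩,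
        by simp; omega⟩
    · exact ⟨(x, y+1), (mem_cellList M N g _).mpr ⟨x, y, hxlt, hy, hb, by simp [cellsOf]⟩,
        by simp; omega⟩
  · rintro ⟨p, hp, rfl⟩
    obtain ⟨x, y, hx, hy, hb, hmem⟩ := (mem_cellList M N g p).mp hp
    obtain ⟨hlen1, hlen2, hg⟩ := (blockCheckA_iff M N g cols h x y hx hy).mp hb
    set k := M - 2 - x with hkdef
    have hxM : x < M := by omega
    have hk1x : M - 1 - x = k + 1 := by omega
    have hkmin : k < min (cols.getD y []).length (cols.getD (y+1) []).length - 1 := by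
      have := hlenM y (by omega)
      omega
    apply (mem_markList N cols _).mpr
    refine ⟨y, k, hy, hkmin, hg, ?_⟩
    simp only [cellsOf, List.mem_cons, List.not_mem_nil, or_false] at hmem
    rcases hmem with rfl | rfl | rfl | rfl
    · simp only [List.mem_cons]
      right; left
      simp; omega
    · simp only [List.mem_cons]
      left
      simp; omega
    · simp only [List.mem_cons]
      right; right; right; left
      simp; omega
    · simp only [List.mem_cons]
      right; right; left
      simp; omega

-- cell-level form: for x < M, grid cell (x,y) is marked iff stack entry (y, M-1-x) is
theorem cell_mark_iff (M N : Nat) (g cols : List (List Char)) (h : SInv M N g cols)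
    (x y : Nat) (hx : x < M) :
    ((x, y) ∈ cellList M N g ↔ (y, M - 1 - x) ∈ markList N cols) := by
  constructor
  · intro hc
    exact (markList_mem_iff M N g cols h _).mpr ⟨(x, y), hc, rfl⟩
  · intro hm
    obtain ⟨p, hp, hpe⟩ := (markList_mem_iff M N g cols h _).mp hm
    have hpM : p.1 < M := (cellList_spec M N g p hp).1
    have h1 : p.2 = y := congrArg Prod.fst hpe |>.symm
    have h2 : M - 1 - p.1 = M - 1 - x := congrArg Prod.snd hpe |>.symm
    have h3 : p.1 = x := by omega
    have : p = (x, y) := by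
      cases p; simp_all
    rwa [this] at hp

theorem set_len_eq {α β : Type} [BEq α] [LawfulBEq α] [BEq β] [LawfulBEq β]
    [DecidableEq α] [DecidableEq β]
    (L1 : List α) (L2 : List β) (f : α → β)
    (hmem : ∀ q, q ∈ L2 ↔ ∃ p ∈ L1, q = f p)
    (hinj : ∀ p ∈ L1, ∀ p' ∈ L1, f p = f p' → p = p') :
    (PySem.Set.ofList L2).length = (PySem.Set.ofList L1).length := by
  rw [← List.toFinset_card_of_nodup (PySem.Set.nodup_ofList L2),
    ← List.toFinset_card_of_nodup (PySem.Set.nodup_ofList L1)]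
  have e2 : (PySem.Set.ofList L2).toFinset = L2.toFinset := by
    apply Finset.ext
    intro a
    simp [List.mem_toFinset, PySem.Set.mem_ofList]
  have e1 : (PySem.Set.ofList L1).toFinset = L1.toFinset := by
    apply Finset.ext
    intro a
    simp [List.mem_toFinset, PySem.Set.mem_ofList]
  rw [e1, e2]
  have himg : L2.toFinset = L1.toFinset.image f := by
    apply Finset.ext
    intro a
    simp only [List.mem_toFinset, Finset.mem_image, hmem]
    constructor
    · rintro ⟨p, hp, rfl⟩; exact ⟨p, hp, rfl⟩
    · rintro ⟨p, hp, rfl⟩; exact ⟨p, hp, rfl⟩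
  rw [himg]
  exact Finset.card_image_of_injOn
    (fun p hp p' hp' he => hinj p (List.mem_toFinset.mp hp) p' (List.mem_toFinset.mp hp') he)

theorem ofList_eq_nil_iff {α : Type} [BEq α] [LawfulBEq α] (L : List α) :
    PySem.Set.ofList L = [] ↔ L = [] := by
  constructor
  · intro hn
    cases hL : L with
    | nil => rfl
    | cons a l =>
      exfalso
      have : a ∈ PySem.Set.ofList L := (PySem.Set.mem_ofList L a).mpr (hL ▸ List.mem_cons_self ..)
      rw [hn] at this
      exact List.not_mem_nil this
  · rintro rfl
    rfl

theorem stack_filter (s : List Char) (hs : ∀ c ∈ s, c ≠ ' ') :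
    ∀ (i : Nat) (p : Nat → Bool),
      ((List.range s.length).map (fun k => if p (k + i) then ' ' else s.getD k ' ')).filter
          (fun c => decide (c ≠ ' '))
        = (s.zipIdx i).filterMap (fun q => if p q.2 then none else some q.1) := by
  induction s with
  | nil => intro i p; rfl
  | cons c t ih =>
    intro i p
    have hc : c ≠ ' ' := hs c (List.mem_cons_self ..)
    have ht : ∀ d ∈ t, d ≠ ' ' := fun d hd => hs d (List.mem_cons_of_mem _ hd)
    rw [List.zipIdx_cons, List.filterMap_cons]
    have hrange : List.range (c :: t).length = 0 :: (List.range t.length).map Nat.succ := by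
      rw [List.length_cons, List.range_succ_eq_map]
    rw [hrange, List.map_cons, List.map_map]
    have hmap : ((List.range t.length).map
          ((fun k => if p (k + i) then ' ' else (c :: t).getD k ' ') ∘ Nat.succ))
        = (List.range t.length).map (fun k => if p (k + (i+1)) then ' ' else t.getD k ' ') := by
      apply List.map_congr_left
      intro k _
      simp only [Function.comp_apply, Nat.succ_eq_add_one, List.getD_cons_succ]
      have : k + 1 + i = k + (i + 1) := by omega
      rw [this]
    rw [hmap]
    by_cases hp : p i
    · simp only [Nat.zero_add, hp, if_pos]
      rw [List.filter_cons_of_neg (by simp)]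
      exact ih ht (i+1) p
    · simp only [Nat.zero_add, hp, if_neg, Bool.false_eq_true, not_false_iff]
      rw [List.filter_cons_of_pos (by simpa using hc), List.getD_cons_zero]
      rw [ih ht (i+1) p]

theorem rev_map_range {α : Type} (h : Nat) (e : Nat → α) :
    (List.range h).map (fun i => e (h - 1 - i)) = ((List.range h).map e).reverse := by
  apply List.ext_getElem
  · simp
  · intro j h1 h2
    simp only [List.getElem_map, List.getElem_range, List.getElem_reverse, List.length_map,
      List.length_range]

theorem removeMarksB_length (mk : PySem.Set (Nat × Nat)) (cols : List (List Char)) :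
    (removeMarksB mk cols).length = cols.length := by
  simp [removeMarksB]

theorem removeMarksB_getD (mk : PySem.Set (Nat × Nat)) (cols : List (List Char))
    (y : Nat) (hy : y < cols.length) :
    (removeMarksB mk cols).getD y []
      = (cols.getD y []).zipIdx.filterMap (fun q =>
          if PySem.Set.contains mk (y, q.2) then none else some q.1) := by
  have hy2 : y < (removeMarksB mk cols).length := by rw [removeMarksB_length]; exact hy
  rw [List.getD_eq_getElem?_getD, List.getElem?_eq_getElem hy2]
  simp only [removeMarksB, List.getElem_map, Option.getD_some]
  have hz : y < cols.zipIdx.length := by simpa using hy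
  rw [List.getElem_zipIdx]
  simp only [Nat.zero_add]
  rw [List.getD_eq_getElem?_getD, List.getElem?_eq_getElem hy]
  rfl

-- one round preserves the simulation invariant
theorem round_inv (M N : Nat) (g cols : List (List Char)) (h : SInv M N g cols) :
    SInv M N (boardSettingA M N (blankL (PySem.Set.ofList (cellList M N g)) g))
      (removeMarksB (marksB N cols) cols) := by
  have hg := h.1
  have hHw : ∀ c ∈ PySem.Set.ofList (cellList M N g), c.1 < M ∧ c.2 < N := by
    intro c hc
    have h1 := cellList_spec M N g c ((PySem.Set.mem_ofList _ c).mp hc)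
    exact ⟨h1.1, h1.2.1⟩
  have hgb : Shape M N (blankL (PySem.Set.ofList (cellList M N g)) g) :=
    shape_blankL M N _ g hg
  obtain ⟨hbsS, hbsG⟩ := boardSetting_spec M N (blankL (PySem.Set.ofList (cellList M N g)) g)
  refine ⟨hbsS, by rw [removeMarksB_length]; exact h.2.1, ?_⟩
  intro y hy
  have hyc : y < cols.length := by rw [h.2.1]; exact hy
  obtain ⟨hsle, hsns, _⟩ := h.2.2 y hy
  rw [removeMarksB_getD (marksB N cols) cols y hyc]
  set ns := (cols.getD y []).zipIdx.filterMap (fun q =>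
    if PySem.Set.contains (marksB N cols) (y, q.2) then none else some q.1) with hnsdef
  have hns_sub : ∀ c ∈ ns, c ∈ cols.getD y [] := by
    intro c hc
    rw [hnsdef] at hc
    obtain ⟨q, hq, hqe⟩ := List.mem_filterMap.mp hc
    have hq1 : q.1 = c := by
      by_cases hm : PySem.Set.contains (marksB N cols) (y, q.2) = true
      · rw [if_pos hm] at hqe; cases hqe
      · rw [if_neg hm] at hqe; exact Option.some.inj hqe
    rw [← hq1]
    exact List.fst_mem_of_mem_zipIdx hq
  have hns_len : ns.length ≤ (cols.getD y []).length := by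
    calc ns.length ≤ (cols.getD y []).zipIdx.length := List.length_filterMap_le _ _
      _ = (cols.getD y []).length := by simp
  have hmarkP : ∀ x < M,
      ((x, y) ∈ PySem.Set.ofList (cellList M N g)
        ↔ PySem.Set.contains (marksB N cols) (y, M - 1 - x) = true) := by
    intro x hx
    rw [PySem.Set.mem_ofList, cell_mark_iff M N g cols h x y hx, marksB_eq,
      PySem.Set.contains_iff, PySem.Set.mem_ofList]
  have hWb : Wcol M (blankL (PySem.Set.ofList (cellList M N g)) g) y
      = List.replicate (M - (cols.getD y []).length) ' '
        ++ ((List.range (cols.getD y []).length).map (fun k =>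
            if PySem.Set.contains (marksB N cols) (y, k) then ' '
            else (cols.getD y []).getD k ' ')).reverse := by
    have hWmap : Wcol M (blankL (PySem.Set.ofList (cellList M N g)) g) y
        = (List.range M).map (fun x =>
          if x < M - (cols.getD y []).length then ' '
          else if PySem.Set.contains (marksB N cols) (y, M - 1 - x) then ' '
          else (cols.getD y []).getD (M - 1 - x) ' ') := by
      unfold Wcol
      apply List.map_congr_left
      intro x hx
      have hxM : x < M := List.mem_range.mp hx
      rw [pvGetA_blankL M N _ g hg hHw x y]
      by_cases hlt : x < M - (cols.getD y []).length
      · have hblank : pvGetA g x y = ' ' := by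
          by_contra hne
          have := (solid_iff M N g cols h x y hxM hy).mp hne
          omega
        have hnm : (x, y) ∉ PySem.Set.ofList (cellList M N g) := by
          intro hm
          exact (cellList_spec M N g (x, y) ((PySem.Set.mem_ofList _ _).mp hm)).2.2 hblank
        rw [if_neg hnm, if_pos hlt, hblank]
      · rw [if_neg hlt]
        by_cases hm : (x, y) ∈ PySem.Set.ofList (cellList M N g)
        · rw [if_pos hm, if_pos ((hmarkP x hxM).mp hm)]
        · rw [if_neg hm, if_neg (fun hc => hm ((hmarkP x hxM).mpr hc)),
            getA_eq_sGet M N g cols h x y hxM hy]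
          rfl
    rw [hWmap]
    have hrange : List.range M
        = List.range (M - (cols.getD y []).length)
          ++ (List.range (cols.getD y []).length).map (M - (cols.getD y []).length + ·) := by
      rw [← List.range_add]
      congr 1
      omega
    rw [hrange, List.map_append]
    congr 1
    · have : ∀ b ∈ (List.range (M - (cols.getD y []).length)).map (fun x =>
          if x < M - (cols.getD y []).length then ' '
          else if PySem.Set.contains (marksB N cols) (y, M - 1 - x) then ' '
          else (cols.getD y []).getD (M - 1 - x) ' '), b = ' ' := by
        intro b hb
        obtain ⟨x, hx, hxe⟩ := List.mem_map.mp hb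
        rw [← hxe, if_pos (List.mem_range.mp hx)]
      rw [List.eq_replicate_of_mem this]
      congr 1
      simp
    · rw [List.map_map, ← rev_map_range]
      apply List.map_congr_left
      intro i hi
      have hiH : i < (cols.getD y []).length := List.mem_range.mp hi
      simp only [Function.comp_apply]
      have hxge : ¬ (M - (cols.getD y []).length + i < M - (cols.getD y []).length) := by omega
      rw [if_neg hxge]
      have hidx : M - 1 - (M - (cols.getD y []).length + i)
          = (cols.getD y []).length - 1 - i := by omega
      rw [hidx]
  have hfilter : (Wcol M (blankL (PySem.Set.ofList (cellList M N g)) g) y).filter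
      (fun c => decide (c ≠ ' ')) = ns.reverse := by
    rw [hWb, List.filter_append]
    have h1 : (List.replicate (M - (cols.getD y []).length) ' ').filter
        (fun c => decide (c ≠ ' ')) = [] := by
      apply List.filter_eq_nil_iff.mpr
      intro c hc
      rw [List.eq_of_mem_replicate hc]
      simp
    rw [h1, List.nil_append, List.filter_reverse]
    congr 1
    have := stack_filter (cols.getD y []) hsns 0
      (fun k => PySem.Set.contains (marksB N cols) (y, k))
    simp only [Nat.add_zero] at this
    rw [this, hnsdef]
  have hwcol : Wcol M (boardSettingA M N (blankL (PySem.Set.ofList (cellList M N g)) g)) y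
      = padColD M (blankL (PySem.Set.ofList (cellList M N g)) g) y := by
    have h1 : Wcol M (boardSettingA M N (blankL (PySem.Set.ofList (cellList M N g)) g)) y
        = (List.range M).map (fun x =>
            (padColD M (blankL (PySem.Set.ofList (cellList M N g)) g) y).getD x ' ') := by
      unfold Wcol
      apply List.map_congr_left
      intro x hx
      exact hbsG x (List.mem_range.mp hx) y hy
    rw [h1, map_getD_self _ M (padColD_length M _ y)]
  have hnl : ns.length ≤ M := le_trans hns_len hsle
  refine ⟨hnl, fun c hc => hsns c (hns_sub c hc), ?_⟩
  rw [hwcol, padColD, hfilter, List.length_reverse]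

-- counts and emptiness of the two mark collections agree
theorem hits_len_eq (M N : Nat) (g cols : List (List Char)) (h : SInv M N g cols) :
    (marksB N cols).length = (PySem.Set.ofList (cellList M N g)).length := by
  rw [marksB_eq]
  exact set_len_eq (cellList M N g) (markList N cols) (fun p => (p.2, M - 1 - p.1))
    (fun q => markList_mem_iff M N g cols h q)
    (fun p hp p' hp' he => by
      have h1 := (cellList_spec M N g p hp).1
      have h2 := (cellList_spec M N g p' hp').1
      have e1 : p.2 = p'.2 := congrArg Prod.fst he
      have e2 : M - 1 - p.1 = M - 1 - p'.1 := congrArg Prod.snd he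
      have : p.1 = p'.1 := by omega
      cases p; cases p'; simp_all)

theorem marks_nil_iff (M N : Nat) (g cols : List (List Char)) (h : SInv M N g cols) :
    marksB N cols = [] ↔ crushPosA M N g = [] := by
  rw [marksB_eq, ofList_eq_nil_iff]
  constructor
  · intro hml
    rw [List.eq_nil_iff_forall_not_mem]
    intro p hp
    have hcell : (p.1, p.2) ∈ cellList M N g := by
      simp only [cellList, List.mem_flatMap]
      exact ⟨p, hp, by simp [cellsOf]⟩
    have : (p.2, M - 1 - p.1) ∈ markList N cols :=
      (markList_mem_iff M N g cols h _).mpr ⟨(p.1, p.2), hcell, rfl⟩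
    rw [hml] at this
    exact List.not_mem_nil this
  · intro hcp
    rw [List.eq_nil_iff_forall_not_mem]
    intro q hq
    obtain ⟨p, hp, _⟩ := (markList_mem_iff M N g cols h q).mp hq
    have : cellList M N g = [] := by
      unfold cellList
      rw [hcp]
      rfl
    rw [this] at hp
    exact List.not_mem_nil hp

theorem loop_eq (M N : Nat) (fuel : Nat) :
    ∀ (g cols : List (List Char)) (ans : Int), SInv M N g cols →
      loopA M N fuel g ans = loopB N fuel cols ans := by
  induction fuel with
  | zero => intro g cols ans _; rfl
  | succ fuel ih =>
    intro g cols ans h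
    show (if crushPosA M N g = [] then ans else _)
        = (if marksB N cols = [] then ans else _)
    by_cases hcp : crushPosA M N g = []
    · rw [if_pos hcp, if_pos ((marks_nil_iff M N g cols h).mpr hcp)]
    · have hmk : marksB N cols ≠ [] := fun hh => hcp ((marks_nil_iff M N g cols h).mp hh)
      rw [if_neg hcp, if_neg hmk]
      have hflat : (crushPosA M N g).foldl (fun s p => blockCrushA p.1 p.2 s) (g, ans)
          = (cellList M N g).foldl
              (fun (s : List (List Char) × Int) p =>
                if pvGetA s.1 p.1 p.2 ≠ ' ' then (pvSetA s.1 p.1 p.2 ' ', s.2 + 1) else s)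
              (g, ans) := by
        rw [cellList]
        exact (List.foldl_flatMap ..).symm
      have hfold := crushFold M N g h.1 (cellList M N g) (cellList_spec M N g)
        PySem.Set.empty ans (by intro c hc; exact absurd hc (List.not_mem_nil)) List.nodup_nil
      have hempty : PySem.Set.update PySem.Set.empty (cellList M N g)
          = PySem.Set.ofList (cellList M N g) := by
        rw [PySem.Set.ofList_eq_foldl]
        rfl
      rw [hempty] at hfold
      have hfold' : (crushPosA M N g).foldl (fun s p => blockCrushA p.1 p.2 s) (g, ans)
          = (blankL (PySem.Set.ofList (cellList M N g)) g,
              ans + ((marksB N cols).length : Int)) := by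
        rw [hflat]
        have hstart : (blankL PySem.Set.empty g, ans) = (g, ans) := rfl
        rw [← hstart, hfold, hits_len_eq M N g cols h]
        refine Prod.ext rfl ?_
        simp
      rw [hfold']
      exact ih _ _ _ (round_inv M N g cols h)

-- the initial board (under Pre_) satisfies the invariant, with full stacks
theorem init_inv (M N : Nat) (board : List String) (hM : M ≤ board.length)
    (hrows : ∀ s ∈ board.take M, N ≤ s.toList.length ∧ ' ' ∉ s.toList.take N) :
    SInv M N ((board.take M).map String.toList) (colsInitB M N board) := by
  have hget : ∀ x < M, ((board.take M).map String.toList).getD x [] = (board.getD x "").toList := by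
    intro x hx
    have hxb : x < board.length := by omega
    simp [List.getD_eq_getElem?_getD, List.getElem?_map, List.getElem?_take, hx,
      List.getElem?_eq_getElem hxb]
  have hmem : ∀ x < M, board.getD x "" ∈ board.take M := by
    intro x hx
    have hxb : x < board.length := by omega
    rw [List.getD_eq_getElem?_getD, List.getElem?_eq_getElem hxb]
    have h2 : x < (board.take M).length := by
      simp only [List.length_take]
      omega
    have h3 : (board.take M)[x] = board[x] := List.getElem_take
    rw [← h3]
    exact List.getElem_mem h2
  have hcolget : ∀ y < N, (colsInitB M N board).getD y []
      = (List.range M).map (fun i => (board.getD (M - 1 - i) "").toList.getD y ' ') := by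
    intro y hy
    simp [colsInitB, List.getD_eq_getElem?_getD, List.getElem?_map, List.getElem?_range, hy]
  refine ⟨⟨by simp only [List.length_map, List.length_take]; omega, ?_⟩,
    by simp [colsInitB], ?_⟩
  · intro x hx
    rw [hget x hx]
    exact (hrows _ (hmem x hx)).1
  · intro y hy
    rw [hcolget y hy]
    have hentry : ∀ x < M, (board.getD x "").toList.getD y ' ' ≠ ' ' := by
      intro x hx
      obtain ⟨hlen, hnsp⟩ := hrows _ (hmem x hx)
      have hyl : y < (board.getD x "").toList.length := by omega
      rw [List.getD_eq_getElem?_getD, List.getElem?_eq_getElem hyl, Option.getD_some]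
      intro hsp
      apply hnsp
      have hyt : y < ((board.getD x "").toList.take N).length := by
        simp only [List.length_take]
        omega
      have : ((board.getD x "").toList.take N)[y] = (board.getD x "").toList[y] :=
        List.getElem_take
      rw [← hsp, ← this]
      exact List.getElem_mem hyt
    constructor
    · simp
    constructor
    · intro c hc
      obtain ⟨i, hi, hie⟩ := List.mem_map.mp hc
      rw [← hie]
      exact hentry _ (by have := List.mem_range.mp hi; omega)
    · have hlen : ((List.range M).map
          (fun i => (board.getD (M - 1 - i) "").toList.getD y ' ')).length = M := by simp
      rw [hlen, Nat.sub_self, List.replicate_zero, List.nil_append]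
      have : ((List.range M).map (fun i => (board.getD (M - 1 - i) "").toList.getD y ' '))
          = ((List.range M).map (fun x => (board.getD x "").toList.getD y ' ')).reverse := by
        exact rev_map_range M (fun x => (board.getD x "").toList.getD y ' ')
      rw [this, List.reverse_reverse]
      unfold Wcol
      apply List.map_congr_left
      intro x hx
      have hxM : x < M := List.mem_range.mp hx
      show pvGetA _ x y = _
      unfold pvGetA
      rw [hget x hxM]

-- ===== VERDICT (by name: the statement is the Claim_ definition above) =====
theorem solution_spec : Claim_equal_solution := by
  unfold Claim_equal_solution Spec_solution
  intro m n board _ hpre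
  obtain ⟨hlen, hrows⟩ := hpre
  by_cases htriv : m < 2 ∨ n < 2
  · have hcp : crushPosA m.toNat n.toNat ((board.take m.toNat).map String.toList) = [] := by
      rcases htriv with hm | hn
      · have h0 : m.toNat - 1 = 0 := by omega
        unfold crushPosA
        rw [h0]
        rfl
      · have h0 : n.toNat - 1 = 0 := by omega
        unfold crushPosA
        rw [h0]
        simp
    unfold solution solution_alt
    rw [if_pos htriv]
    show (if crushPosA m.toNat n.toNat ((board.take m.toNat).map String.toList) = []
        then (0 : Int) else _) = 0
    rw [if_pos hcp]
  · unfold solution solution_alt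
    rw [if_neg htriv]
    have hm2 : 2 ≤ m := by omega
    have hn2 : 2 ≤ n := by omega
    apply loop_eq
    apply init_inv
    · omega
    · intro s hs
      obtain ⟨h1, h2⟩ := hrows hm2 hn2 s hs
      exact ⟨by omega, h2⟩
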